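-- pv_equiv track=rewrite | github.com/TrueDolphin/references | python scripts/flags.map/current.py | decompose_value
-- ===== SOURCE A (Python) =====
-- def decompose_value(value, flag):
--     bitflags = [3]
--     bitflags += [2**i for i in range(1, 16)]
--     if flag > 0:
--         bitflags = [1, 2, 4, 8, 16]
--
--     bitflags = sorted(bitflags)
--     decomposition = []
--
--     for bitflag in reversed(bitflags):
--         while value >= bitflag:
--             decomposition.append(bitflag)
--             value -= bitflag
--
--     if value > 0:
--         decomposition.append(value)
--
--     return decomposition
-- ===== SOURCE B (Python) =====
-- def decompose_value(value, flag):
--     if flag > 0: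
--         bitflags = [1, 2, 4, 8, 16]
--     else:
--         bitflags = [3] + [2 ** i for i in range(1, 16)]
--     decomposition = []
--     for bitflag in sorted(bitflags, reverse=True):
--         if value >= bitflag:
--             count, value = divmod(value, bitflag)
--             decomposition += [bitflag] * count
--     if value > 0:
--         decomposition.append(value)
--     return decomposition
-- ===== Notes on version B (the rewrite author's own statement) =====
-- stated objective: faster
-- what changed: Replaces the inner repeated-subtraction while loop with one closed-form divmod step per flag, appending count copies at once.
import Mathlib
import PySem

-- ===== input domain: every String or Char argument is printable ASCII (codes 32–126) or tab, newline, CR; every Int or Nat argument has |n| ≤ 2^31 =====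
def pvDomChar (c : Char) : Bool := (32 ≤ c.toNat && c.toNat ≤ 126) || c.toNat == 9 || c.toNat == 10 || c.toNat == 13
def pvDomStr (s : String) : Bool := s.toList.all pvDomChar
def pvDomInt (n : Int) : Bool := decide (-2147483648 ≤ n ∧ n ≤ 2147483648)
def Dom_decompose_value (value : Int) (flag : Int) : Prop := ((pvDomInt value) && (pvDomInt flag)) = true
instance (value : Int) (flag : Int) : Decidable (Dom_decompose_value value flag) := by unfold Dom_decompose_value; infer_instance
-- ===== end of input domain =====

-- B replaces A's inner repeated-subtraction while loop by one divmod step per flag (objective: faster).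

-- ===== PORT A =====
-- the inner 'while value >= bitflag' loop; fuel = value.toNat suffices since each
-- iteration subtracts bitflag ≥ 1 (the flag lists only contain positive values)
def pvWhileSub (b : Int) : Nat → Int → List Int → Int × List Int
  | 0, v, acc => (v, acc)
  | f + 1, v, acc => if b ≤ v then pvWhileSub b f (v - b) (acc ++ [b]) else (v, acc)

def decompose_value (value : Int) (flag : Int) : List Int :=
  let bitflags : List Int := [3] ++ (PySem.List.pyRange 1 16 1).map (fun i => (2 : Int) ^ i.toNat)
  let bitflags := if flag > 0 then [1, 2, 4, 8, 16] else bitflags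
  let bitflags := PySem.List.sorted bitflags (fun x => x) false
  let st := bitflags.reverse.foldl
    (fun (st : Int × List Int) b => pvWhileSub b st.1.toNat st.1 st.2) (value, [])
  if st.1 > 0 then st.2 ++ [st.1] else st.2

-- ===== PORT B =====
def decompose_value_alt (value : Int) (flag : Int) : List Int :=
  let bitflags : List Int :=
    if flag > 0 then [1, 2, 4, 8, 16]
    else [3] ++ (PySem.List.pyRange 1 16 1).map (fun i => (2 : Int) ^ i.toNat)
  let st := (PySem.List.sorted bitflags (fun x => x) true).foldl
    (fun (st : Int × List Int) b =>
      if b ≤ st.1 then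
        (PySem.Int.mod st.1 b, st.2 ++ List.replicate (PySem.Int.floordiv st.1 b).toNat b)
      else st) (value, [])
  if st.1 > 0 then st.2 ++ [st.1] else st.2

-- ===== PRECONDITION & SPEC =====
def Spec_decompose_value (value : Int) (flag : Int) (out : List Int) : Prop := out = decompose_value_alt value flag
instance (value : Int) (flag : Int) (out : List Int) : Decidable (Spec_decompose_value value flag out) := by unfold Spec_decompose_value; infer_instance

-- ===== CLAIM (what is proved, stated in full; the proofs are below) =====
def Claim_equal_decompose_value : Prop := ∀ (value : Int) (flag : Int), Dom_decompose_value value flag → Spec_decompose_value value flag (decompose_value value flag)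

-- ===== LEMMAS AND PROOFS =====

-- the while loop computes divmod: remainder and (v // b) copies of b appended
lemma pvWhileSub_eq (b : Int) (hb : 0 < b) :
    ∀ (f : Nat) (v : Int) (acc : List Int), v.toNat ≤ f →
      pvWhileSub b f v acc =
        if b ≤ v then
          (PySem.Int.mod v b, acc ++ List.replicate (PySem.Int.floordiv v b).toNat b)
        else (v, acc) := by
  intro f
  induction f with
  | zero =>
    intro v acc hf
    have hv : v ≤ 0 := by omega
    rw [pvWhileSub, if_neg (by omega : ¬ b ≤ v)]
  | succ f ih =>
    intro v acc hf
    by_cases hle : b ≤ v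
    · have hq1 : 1 ≤ PySem.Int.floordiv v b := by
        rw [PySem.Int.le_floordiv_iff_mul_le hb]; omega
      have hqd : PySem.Int.floordiv (v - b) b = PySem.Int.floordiv v b - 1 := by
        rcases (PySem.Int.floordiv_eq_iff_of_pos hb).mp rfl with ⟨h1, h2⟩
        rw [PySem.Int.floordiv_eq_iff_of_pos hb]
        constructor <;> nlinarith
      have hmd : PySem.Int.mod (v - b) b = PySem.Int.mod v b := by
        have e1 := PySem.Int.floordiv_mul_add_mod (v - b) b
        have e2 := PySem.Int.floordiv_mul_add_mod v b
        rw [hqd] at e1; nlinarith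
      have hrec : (v - b).toNat ≤ f := by omega
      rw [pvWhileSub, if_pos hle, ih (v - b) (acc ++ [b]) hrec, if_pos hle]
      by_cases hle2 : b ≤ v - b
      · rw [if_pos hle2, hmd, hqd]
        have hq2 : 2 ≤ PySem.Int.floordiv v b := by
          rw [PySem.Int.le_floordiv_iff_mul_le hb]; omega
        have : (PySem.Int.floordiv v b).toNat = ((PySem.Int.floordiv v b - 1).toNat) + 1 := by omega
        rw [this, List.replicate_succ, List.append_assoc]
        rfl
      · rw [if_neg hle2]
        have hq : PySem.Int.floordiv v b = 1 := by
          rcases (PySem.Int.floordiv_eq_iff_of_pos hb).mp rfl with ⟨h1, h2⟩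
          nlinarith
        have hm : PySem.Int.mod v b = v - b := by
          have e2 := PySem.Int.floordiv_mul_add_mod v b
          rw [hq] at e2; omega
        rw [hq, hm]
        simp
    · rw [pvWhileSub, if_neg hle, if_neg hle]

-- both folds agree element-wise on lists of positive flags
lemma pvFold_eq (L : List Int) (hL : ∀ b ∈ L, 0 < b) (st : Int × List Int) :
    L.foldl (fun (st : Int × List Int) b => pvWhileSub b st.1.toNat st.1 st.2) st =
    L.foldl (fun (st : Int × List Int) b =>
      if b ≤ st.1 then
        (PySem.Int.mod st.1 b, st.2 ++ List.replicate (PySem.Int.floordiv st.1 b).toNat b)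
      else st) st := by
  refine PySem.List.foldl_congr_mem _ _ _ _ ?_
  intro acc x hx
  rw [pvWhileSub_eq x (hL x hx) acc.1.toNat acc.1 acc.2 le_rfl]

-- ===== VERDICT (by name: the statement is the Claim_ definition above) =====
theorem decompose_value_spec : Claim_equal_decompose_value := by
  intro value flag _
  unfold Spec_decompose_value decompose_value decompose_value_alt
  by_cases h : flag > 0
  · simp only [if_pos h]
    have hlist : (PySem.List.sorted ([1, 2, 4, 8, 16] : List Int) (fun x => x) false).reverse
        = PySem.List.sorted ([1, 2, 4, 8, 16] : List Int) (fun x => x) true := by decide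
    rw [hlist, pvFold_eq _ (by decide)]
  · simp only [if_neg h]
    have hlist : (PySem.List.sorted (([3] ++ (PySem.List.pyRange 1 16 1).map (fun i => (2 : Int) ^ i.toNat)) : List Int) (fun x => x) false).reverse
        = PySem.List.sorted (([3] ++ (PySem.List.pyRange 1 16 1).map (fun i => (2 : Int) ^ i.toNat)) : List Int) (fun x => x) true := by decide
    rw [hlist, pvFold_eq _ (by decide)]
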